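-- pv_equiv track=rewrite | github.com/LuiGiThuv/sigepol-backend | importaciones/validators.py | _detectar_tipo_carga
-- ===== SOURCE A (Python) =====
-- from typing import Dict, List, Tuple, Any
--
-- def _detectar_tipo_carga(columnas: List[str]) -> str:
--     """Detecta el tipo de carga por las columnas presentes"""
--     columnas_lower = [c.lower() for c in columnas]
--
--     # Pólizas
--     if any('poliza' in c for c in columnas_lower):
--         return 'polizas'
--
--     # Cobranzas
--     if any('pago' in c or 'cobranza' in c for c in columnas_lower):
--         return 'cobranzas'
--
--     # Clientes
--     if any('rut' in c or 'cliente' in c for c in columnas_lower):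
--         return 'clientes'
--
--     return None
-- ===== SOURCE B (Python) =====
-- def _detectar_tipo_carga(columnas):
--     """Detecta el tipo de carga por las columnas presentes (one pass + priority pick)"""
--     found = set()
--     for c in columnas:
--         cl = c.lower()
--         if 'poliza' in cl:
--             found.add('polizas')
--         if 'pago' in cl or 'cobranza' in cl:
--             found.add('cobranzas')
--         if 'rut' in cl or 'cliente' in cl:
--             found.add('clientes')
--     for tipo in ('polizas', 'cobranzas', 'clientes'):
--         if tipo in found:
--             return tipo
--     return None
-- ===== Notes on version B (the rewrite author's own statement) =====
-- stated objective: alternative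
-- what changed: B makes a single pass over the columns maintaining a set of detected categories, then picks the highest-priority one, instead of A's three independent short-circuiting scans over the lowercased list.
import Mathlib
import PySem

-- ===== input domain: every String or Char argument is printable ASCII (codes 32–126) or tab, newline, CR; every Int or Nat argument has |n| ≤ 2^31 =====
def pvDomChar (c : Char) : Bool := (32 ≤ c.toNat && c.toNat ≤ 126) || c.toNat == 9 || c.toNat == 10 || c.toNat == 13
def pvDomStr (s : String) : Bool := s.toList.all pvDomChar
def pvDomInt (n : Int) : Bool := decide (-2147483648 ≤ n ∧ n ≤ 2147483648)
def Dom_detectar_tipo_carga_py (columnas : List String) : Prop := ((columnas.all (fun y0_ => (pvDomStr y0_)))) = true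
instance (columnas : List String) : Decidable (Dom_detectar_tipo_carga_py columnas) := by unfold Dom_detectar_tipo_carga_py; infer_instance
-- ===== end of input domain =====

-- B makes a single pass collecting detected categories in a set, then picks the
-- highest-priority one, instead of A's three independent short-circuiting scans;
-- same behaviour, different decomposition (objective: alternative).


-- ===== PORT A =====
def detectar_tipo_carga_py (columnas : List String) : Option String :=
  let columnas_lower := columnas.map (fun c => PySem.Str.lower c)
  if columnas_lower.any (fun c => PySem.Str.isIn "poliza" c) then some "polizas"
  else if columnas_lower.any (fun c => PySem.Str.isIn "pago" c || PySem.Str.isIn "cobranza" c) then some "cobranzas"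
  else if columnas_lower.any (fun c => PySem.Str.isIn "rut" c || PySem.Str.isIn "cliente" c) then some "clientes"
  else none

-- ===== PORT B =====
-- one loop iteration of B: add to the 'found' set each category this column matches
def detectaStep (s : PySem.Set String) (c : String) : PySem.Set String :=
  let cl := PySem.Str.lower c
  let s1 := if PySem.Str.isIn "poliza" cl then PySem.Set.add s "polizas" else s
  let s2 := if PySem.Str.isIn "pago" cl || PySem.Str.isIn "cobranza" cl then PySem.Set.add s1 "cobranzas" else s1
  if PySem.Str.isIn "rut" cl || PySem.Str.isIn "cliente" cl then PySem.Set.add s2 "clientes" else s2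

def detectar_tipo_carga_py_alt (columnas : List String) : Option String :=
  let found := columnas.foldl detectaStep PySem.Set.empty
  (["polizas", "cobranzas", "clientes"]).find? (fun t => PySem.Set.contains found t)

-- ===== PRECONDITION & SPEC =====
def Spec_detectar_tipo_carga_py (columnas : List String) (out : Option String) : Prop := out = detectar_tipo_carga_py_alt columnas
instance (columnas : List String) (out : Option String) : Decidable (Spec_detectar_tipo_carga_py columnas out) := by unfold Spec_detectar_tipo_carga_py; infer_instance

-- ===== CLAIM (what is proved, stated in full; the proofs are below) =====
def Claim_equal_detectar_tipo_carga_py : Prop := ∀ (columnas : List String), Dom_detectar_tipo_carga_py columnas → Spec_detectar_tipo_carga_py columnas (detectar_tipo_carga_py columnas)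

-- ===== LEMMAS AND PROOFS =====

theorem contains_add_iff (s : PySem.Set String) (x t : String) :
    PySem.Set.contains (PySem.Set.add s x) t = (PySem.Set.contains s t || t == x) := by
  simp only [PySem.Set.add, PySem.Set.contains_eq_listContains]
  split_ifs with h
  · by_cases ht : t = x
    · subst ht; rw [h]; simp
    · simp [ht]
  · by_cases ht : t = x <;> simp [ht]

theorem contains_step (s : PySem.Set String) (c t : String)
    (ht : t = "polizas" ∨ t = "cobranzas" ∨ t = "clientes") :
    PySem.Set.contains (detectaStep s c) t =
      (PySem.Set.contains s t ||
        (if t = "polizas" then PySem.Str.isIn "poliza" (PySem.Str.lower c)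
         else if t = "cobranzas" then PySem.Str.isIn "pago" (PySem.Str.lower c) || PySem.Str.isIn "cobranza" (PySem.Str.lower c)
         else PySem.Str.isIn "rut" (PySem.Str.lower c) || PySem.Str.isIn "cliente" (PySem.Str.lower c))) := by
  simp only [detectaStep]
  rcases ht with h | h | h <;> subst h <;>
    split_ifs <;> simp_all [contains_add_iff, PySem.Set.contains_eq_listContains]

theorem contains_foldl (cs : List String) (s : PySem.Set String) (t : String)
    (ht : t = "polizas" ∨ t = "cobranzas" ∨ t = "clientes") :
    PySem.Set.contains (cs.foldl detectaStep s) t =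
      (PySem.Set.contains s t ||
        cs.any (fun c =>
          if t = "polizas" then PySem.Str.isIn "poliza" (PySem.Str.lower c)
          else if t = "cobranzas" then PySem.Str.isIn "pago" (PySem.Str.lower c) || PySem.Str.isIn "cobranza" (PySem.Str.lower c)
          else PySem.Str.isIn "rut" (PySem.Str.lower c) || PySem.Str.isIn "cliente" (PySem.Str.lower c))) := by
  induction cs generalizing s with
  | nil => simp
  | cons c cs ih =>
    rw [List.foldl_cons, List.any_cons, ih (detectaStep s c),
      contains_step s c t ht, Bool.or_assoc]

theorem empty_not_contains (t : String) : PySem.Set.contains PySem.Set.empty t = false := by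
  simp [PySem.Set.empty, PySem.Set.contains_eq_listContains]

-- ===== VERDICT (by name: the statement is the Claim_ definition above) =====
theorem detectar_tipo_carga_py_spec : Claim_equal_detectar_tipo_carga_py := by
  intro columnas _
  unfold Spec_detectar_tipo_carga_py detectar_tipo_carga_py detectar_tipo_carga_py_alt
  have hp := contains_foldl columnas PySem.Set.empty "polizas" (Or.inl rfl)
  have hc := contains_foldl columnas PySem.Set.empty "cobranzas" (Or.inr (Or.inl rfl))
  have hl := contains_foldl columnas PySem.Set.empty "clientes" (Or.inr (Or.inr rfl))
  simp only [empty_not_contains, Bool.false_or, String.reduceEq, reduceIte] at hp hc hl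
  simp only [List.any_map, Function.comp_def]
  cases h1 : columnas.any (fun c => PySem.Str.isIn "poliza" (PySem.Str.lower c)) <;>
  cases h2 : columnas.any (fun c => PySem.Str.isIn "pago" (PySem.Str.lower c) || PySem.Str.isIn "cobranza" (PySem.Str.lower c)) <;>
  cases h3 : columnas.any (fun c => PySem.Str.isIn "rut" (PySem.Str.lower c) || PySem.Str.isIn "cliente" (PySem.Str.lower c)) <;>
    simp only [List.find?, hp, hc, hl, h1, h2, h3] <;> simp
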